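-- pv_equiv track=rewrite | github.com/layer6ai-labs/conformal-importance-summarization | src/data/processing_utils.py | combine_conversations
-- ===== SOURCE A (Python) =====
-- def combine_conversations(conversation):
--     sentences = [s.strip() for s in conversation.replace('\r', '').split('\n') if s.strip()]
--     combined, current = [], ""
--     for sentence in sentences:
--         if sentence.startswith("Doctor:"):
--             if current: combined.append(current)
--             current = sentence
--         elif sentence.startswith("Patient:"):
--             current += f" {sentence}" if current else sentence
--         else:
--             current += f" {sentence}"
--     if current: combined.append(current)
--     return [s.strip() for s in combined]
-- ===== SOURCE B (Python) =====
-- def combine_conversations(conversation):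
--     sentences = [s.strip() for s in conversation.replace('\r', '').split('\n') if s.strip()]
--     out = []
--     xs = sentences
--     while xs:
--         # the block is xs[0] plus the run of following non-"Doctor:" lines
--         k = 1
--         while k < len(xs) and not xs[k].startswith("Doctor:"):
--             k += 1
--         out.append(" ".join(xs[:k]).strip())
--         xs = xs[k:]
--     return out
-- ===== Notes on version B (the rewrite author's own statement) =====
-- stated objective: alternative
-- what changed: Replaces A's accumulate-and-flush fold (a (combined, current) state mutated line by line with per-line string concatenation) by a recursive block decomposition: each block is the head line plus the run of following non-Doctor lines, joined with a single space; no intermediate accumulator string is threaded through the loop.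
import Mathlib
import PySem

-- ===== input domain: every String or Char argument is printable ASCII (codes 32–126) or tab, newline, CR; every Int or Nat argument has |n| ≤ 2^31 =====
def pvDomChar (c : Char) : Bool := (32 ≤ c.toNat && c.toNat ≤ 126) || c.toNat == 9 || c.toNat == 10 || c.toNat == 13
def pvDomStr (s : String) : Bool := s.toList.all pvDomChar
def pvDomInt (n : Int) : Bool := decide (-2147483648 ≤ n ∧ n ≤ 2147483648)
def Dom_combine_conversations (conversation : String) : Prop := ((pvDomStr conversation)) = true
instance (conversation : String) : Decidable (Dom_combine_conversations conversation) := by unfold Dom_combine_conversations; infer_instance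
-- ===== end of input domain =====

-- B replaces A's accumulate-and-flush fold with a recursive block decomposition
-- (head line + run of following non-"Doctor:" lines, joined with one space); same
-- cost, different structure (objective: alternative).

-- ===== PORT A =====
-- one loop step of A: state is (combined, current)
def pvStepA (acc : List (List Char) × List Char) (sentence : List Char) :
    List (List Char) × List Char :=
  if PySem.Chars.startswith sentence "Doctor:".toList then
    (if acc.2 ≠ [] then acc.1 ++ [acc.2] else acc.1, sentence)
  else if PySem.Chars.startswith sentence "Patient:".toList then
    (acc.1, if acc.2 ≠ [] then acc.2 ++ ' ' :: sentence else sentence)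
  else
    (acc.1, acc.2 ++ ' ' :: sentence)

-- the trailing "if current: combined.append(current)"
def pvFinishA (p : List (List Char) × List Char) : List (List Char) :=
  if p.2 ≠ [] then p.1 ++ [p.2] else p.1

def combine_conversations (conversation : String) : List String :=
  let sentences : List (List Char) :=
    (PySem.Chars.splitOn (PySem.Chars.replace conversation.toList ['\r'] []) ['\n']).filterMap
      (fun s => if PySem.Chars.strip s ≠ [] then some (PySem.Chars.strip s) else none)
  let p := sentences.foldl pvStepA ([], [])
  (pvFinishA p).map (fun s => String.ofList (PySem.Chars.strip s))

-- ===== PORT B =====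
-- blocks(xs): head line plus the following non-"Doctor:" lines form one block
def pvBlocks : List (List Char) → List (List Char)
  | [] => []
  | x :: rest =>
    PySem.Chars.strip (PySem.Chars.join [' ']
        (x :: rest.takeWhile (fun s => !PySem.Chars.startswith s "Doctor:".toList)))
      :: pvBlocks (rest.dropWhile (fun s => !PySem.Chars.startswith s "Doctor:".toList))
termination_by xs => xs.length
decreasing_by
  simp only [List.length_cons]
  exact Nat.lt_succ_of_le (List.length_dropWhile_le _ _)

def combine_conversations_alt (conversation : String) : List String :=
  let sentences : List (List Char) :=
    (PySem.Chars.splitOn (PySem.Chars.replace conversation.toList ['\r'] []) ['\n']).filterMap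
      (fun s => if PySem.Chars.strip s ≠ [] then some (PySem.Chars.strip s) else none)
  (pvBlocks sentences).map String.ofList

-- ===== PRECONDITION & SPEC =====
def Spec_combine_conversations (conversation : String) (out : List String) : Prop := out = combine_conversations_alt conversation
instance (conversation : String) (out : List String) : Decidable (Spec_combine_conversations conversation out) := by unfold Spec_combine_conversations; infer_instance

-- ===== CLAIM (what is proved, stated in full; the proofs are below) =====
def Claim_equal_combine_conversations : Prop := ∀ (conversation : String), Dom_combine_conversations conversation → Spec_combine_conversations conversation (combine_conversations conversation)

-- ===== LEMMAS AND PROOFS =====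

-- A's result after the strip pass, started from an arbitrary `current`
def pvG (cur : List Char) (xs : List (List Char)) : List (List Char) :=
  (pvFinishA (xs.foldl pvStepA ([], cur))).map PySem.Chars.strip

lemma pvStepA_prefix (c0 : List (List Char)) (p : List (List Char) × List Char)
    (y : List Char) :
    pvStepA (c0 ++ p.1, p.2) y = (c0 ++ (pvStepA p y).1, (pvStepA p y).2) := by
  unfold pvStepA
  split_ifs <;> simp [List.append_assoc]

lemma pvFoldl_prefix (xs : List (List Char)) (c0 : List (List Char))
    (p : List (List Char) × List Char) :
    xs.foldl pvStepA (c0 ++ p.1, p.2)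
      = (c0 ++ (xs.foldl pvStepA p).1, (xs.foldl pvStepA p).2) := by
  induction xs generalizing p with
  | nil => simp
  | cons y ys ih =>
    simp only [List.foldl_cons]
    rw [pvStepA_prefix c0 p y]
    exact ih (pvStepA p y)

lemma pvJoin_append (a b : List Char) (l : List (List Char)) :
    PySem.Chars.join [' '] ((a ++ ' ' :: b) :: l)
      = a ++ ' ' :: PySem.Chars.join [' '] (b :: l) := by
  cases l with
  | nil => simp [PySem.Chars.join_singleton]
  | cons z l' =>
    rw [PySem.Chars.join_cons_cons, PySem.Chars.join_cons_cons]
    simp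

lemma pvStrip_space (t : List Char) :
    PySem.Chars.strip (' ' :: t) = PySem.Chars.strip t := by
  simp [PySem.Chars.strip, PySem.Chars.lstrip, PySem.Chars.isspace]

lemma pvStartswith_ne_nil (s p : List Char) (hp : p ≠ [])
    (h : PySem.Chars.startswith s p = true) : s ≠ [] := by
  obtain ⟨t, ht⟩ := (PySem.Chars.startswith_iff s p).mp h
  intro hs
  rw [hs] at ht
  have := List.append_eq_nil_iff.mp ht
  exact hp this.1

lemma pvTake_doc (y : List Char) (ys : List (List Char))
    (hd : PySem.Chars.startswith y "Doctor:".toList = true) :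
    List.takeWhile (fun s => !PySem.Chars.startswith s "Doctor:".toList) (y :: ys) = []
      ∧ List.dropWhile (fun s => !PySem.Chars.startswith s "Doctor:".toList) (y :: ys)
          = y :: ys := by
  constructor
  · rw [List.takeWhile_cons, hd]
    rfl
  · rw [List.dropWhile_cons, hd]
    rfl

lemma pvTake_nondoc (y : List Char) (ys : List (List Char))
    (hd : PySem.Chars.startswith y "Doctor:".toList = false) :
    List.takeWhile (fun s => !PySem.Chars.startswith s "Doctor:".toList) (y :: ys)
        = y :: List.takeWhile (fun s => !PySem.Chars.startswith s "Doctor:".toList) ys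
      ∧ List.dropWhile (fun s => !PySem.Chars.startswith s "Doctor:".toList) (y :: ys)
          = List.dropWhile (fun s => !PySem.Chars.startswith s "Doctor:".toList) ys := by
  constructor
  · rw [List.takeWhile_cons, hd]
    rfl
  · rw [List.dropWhile_cons, hd]
    rfl

lemma pvG_key (xs : List (List Char)) :
    ∀ cur : List Char, cur ≠ [] →
      pvG cur xs
        = PySem.Chars.strip (PySem.Chars.join [' ']
            (cur :: xs.takeWhile (fun s => !PySem.Chars.startswith s "Doctor:".toList)))
          :: pvBlocks (xs.dropWhile (fun s => !PySem.Chars.startswith s "Doctor:".toList)) := by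
  induction xs with
  | nil =>
    intro cur hcur
    simp [pvG, pvFinishA, hcur, PySem.Chars.join_singleton, pvBlocks]
  | cons y ys ih =>
    intro cur hcur
    by_cases hd : PySem.Chars.startswith y "Doctor:".toList = true
    · have hy : y ≠ [] := pvStartswith_ne_nil y _ (by decide) hd
      have h1 : pvG cur (y :: ys) = PySem.Chars.strip cur :: pvG y ys := by
        unfold pvG
        simp only [List.foldl_cons]
        have hstep : pvStepA ([], cur) y = ([cur], y) := by
          unfold pvStepA
          rw [if_pos hd]
          simp [hcur]
        rw [hstep]
        have hpre := pvFoldl_prefix ys [cur] ([], y)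
        simp only [List.append_nil] at hpre
        rw [hpre]
        unfold pvFinishA
        by_cases h2 : (ys.foldl pvStepA ([], y)).2 = []
        · simp [h2]
        · simp [h2]
      obtain ⟨ht, hdrop⟩ := pvTake_doc y ys hd
      rw [h1, ih y hy, ht, hdrop, PySem.Chars.join_singleton]
      rw [pvBlocks]
    · have hd' : PySem.Chars.startswith y "Doctor:".toList = false :=
        Bool.eq_false_iff.mpr hd
      have h1 : pvG cur (y :: ys) = pvG (cur ++ ' ' :: y) ys := by
        unfold pvG
        simp only [List.foldl_cons]
        have hstep : pvStepA ([], cur) y = ([], cur ++ ' ' :: y) := by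
          unfold pvStepA
          rw [if_neg hd]
          by_cases hp : PySem.Chars.startswith y "Patient:".toList = true
          · rw [if_pos hp]
            simp [hcur]
          · rw [if_neg hp]
        rw [hstep]
      have hne : cur ++ ' ' :: y ≠ [] := by simp
      obtain ⟨ht, hdrop⟩ := pvTake_nondoc y ys hd'
      rw [h1, ih _ hne, ht, hdrop, pvJoin_append, PySem.Chars.join_cons_cons]
      simp

lemma pvG_nil_eq_blocks (xs : List (List Char)) :
    pvG [] xs = pvBlocks xs := by
  cases xs with
  | nil => simp [pvG, pvFinishA, pvBlocks]
  | cons y ys =>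
    have hswap : ∀ c : List Char, pvStepA ([], []) y = ([], c) → c ≠ [] →
        pvG [] (y :: ys) = pvG c ys := by
      intro c hc _
      unfold pvG
      simp only [List.foldl_cons]
      rw [hc]
    by_cases hd : PySem.Chars.startswith y "Doctor:".toList = true
    · have hy : y ≠ [] := pvStartswith_ne_nil y _ (by decide) hd
      have h1 : pvG [] (y :: ys) = pvG y ys := by
        apply hswap y _ hy
        unfold pvStepA
        rw [if_pos hd]
        simp
      rw [h1, pvG_key ys y hy, pvBlocks]
    · have hd' : PySem.Chars.startswith y "Doctor:".toList = false :=
        Bool.eq_false_iff.mpr hd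
      by_cases hp : PySem.Chars.startswith y "Patient:".toList = true
      · have hy : y ≠ [] := pvStartswith_ne_nil y _ (by decide) hp
        have h1 : pvG [] (y :: ys) = pvG y ys := by
          apply hswap y _ hy
          unfold pvStepA
          rw [if_neg hd, if_pos hp]
          simp
        rw [h1, pvG_key ys y hy, pvBlocks]
      · have h1 : pvG [] (y :: ys) = pvG (' ' :: y) ys := by
          apply hswap (' ' :: y) _ (by simp)
          unfold pvStepA
          rw [if_neg hd, if_neg hp]
          rfl
        have hj : PySem.Chars.join [' ']
            ((' ' :: y) :: ys.takeWhile (fun s => !PySem.Chars.startswith s "Doctor:".toList))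
            = ' ' :: PySem.Chars.join [' ']
                (y :: ys.takeWhile (fun s => !PySem.Chars.startswith s "Doctor:".toList)) := by
          cases hys : ys.takeWhile (fun s => !PySem.Chars.startswith s "Doctor:".toList) with
          | nil => simp [PySem.Chars.join_singleton]
          | cons z l' =>
            rw [PySem.Chars.join_cons_cons, PySem.Chars.join_cons_cons]
            simp
        rw [h1, pvG_key ys _ (by simp), hj, pvStrip_space, pvBlocks]

-- ===== VERDICT (by name: the statement is the Claim_ definition above) =====
theorem combine_conversations_spec : Claim_equal_combine_conversations := by
  intro conversation _
  unfold Spec_combine_conversations combine_conversations combine_conversations_alt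
  have h := pvG_nil_eq_blocks
    ((PySem.Chars.splitOn (PySem.Chars.replace conversation.toList ['\r'] []) ['\n']).filterMap
      (fun s => if PySem.Chars.strip s ≠ [] then some (PySem.Chars.strip s) else none))
  unfold pvG at h
  simp only []
  rw [← h, List.map_map]
  rfl
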